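-- pv_equiv track=rewrite | github.com/lahirisoham2004/JU_CSE_LAB_Assignments | BCSE-III/AI_LAB/Code/GRAPH SEARCH ALGORITHMS.py | dfs
-- ===== SOURCE A (Python) =====
-- def dfs(adj_matrix, start, goal):
--     stack = [(start, [start])]
--     visited = set()
--     while stack:
--         node, path = stack.pop()
--         if node == goal:
--             return path
--         if node not in visited:
--             visited.add(node)
--             for neighbor in range(len(adj_matrix) - 1, -1, -1):
--                 if adj_matrix[node][neighbor] and neighbor not in visited:
--                     stack.append((neighbor, path + [neighbor]))
--     return None
-- ===== SOURCE B (Python) =====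
-- def dfs(adj_matrix, start, goal):
--     n = len(adj_matrix)
--     visited = set()
--
--     def rec(node, path):
--         if node == goal:
--             return path
--         visited.add(node)
--         for neighbor in range(n):
--             if adj_matrix[node][neighbor] and neighbor not in visited:
--                 result = rec(neighbor, path + [neighbor])
--                 if result is not None:
--                     return result
--         return None
--
--     return rec(start, [start])
-- ===== Notes on version B (the rewrite author's own statement) =====
-- stated objective: simpler
-- what changed: Replaces the explicit stack of (node, path) pairs with reverse-order pushing and pop-time visited marking by a recursive DFS helper that marks visited on entry and scans neighbours in increasing index order, returning the first non-None result.
-- outside the precondition, e.g. on dfs([[0, 0], [1]], 0, 5): A returns None, B returns None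
import Mathlib
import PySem

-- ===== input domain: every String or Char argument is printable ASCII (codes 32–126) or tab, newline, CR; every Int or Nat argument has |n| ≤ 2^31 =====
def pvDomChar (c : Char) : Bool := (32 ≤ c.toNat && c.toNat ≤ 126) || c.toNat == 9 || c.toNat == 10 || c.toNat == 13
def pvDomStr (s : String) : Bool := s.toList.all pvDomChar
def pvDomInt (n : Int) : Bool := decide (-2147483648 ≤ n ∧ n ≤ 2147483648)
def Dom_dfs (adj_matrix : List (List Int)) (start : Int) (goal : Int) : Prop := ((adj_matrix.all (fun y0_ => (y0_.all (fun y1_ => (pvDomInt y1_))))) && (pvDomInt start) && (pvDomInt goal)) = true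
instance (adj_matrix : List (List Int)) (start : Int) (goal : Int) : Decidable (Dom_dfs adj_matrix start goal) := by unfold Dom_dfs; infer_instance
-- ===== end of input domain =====

-- B rewrites the explicit-stack DFS as a recursive DFS (visited marked on entry, neighbours
-- scanned in increasing index order), returning the same first-found path; objective: simpler.

-- ===== PORT A =====
-- adj_matrix[i][j] (Python indexing, negative wraps); default 0 outside Pre_ (where Python raises)
def pvAdj (adj_matrix : List (List Int)) (i j : Int) : Int :=
  (PySem.List.pyGet? ((PySem.List.pyGet? adj_matrix i).getD []) j).getD 0

-- the while loop; stack top at the HEAD of the list (Python appends/pops at the end);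
-- the Nat fuel only makes the loop total: it decreases on expansions and is never exhausted
def dfsLoop (adj_matrix : List (List Int)) (goal : Int) :
    Nat → List (Int × List Int) → PySem.Set Int → Option (List Int)
  | _, [], _ => none
  | f, (node, path) :: rest, visited =>
    if node = goal then some path
    else if node ∈ visited then dfsLoop adj_matrix goal f rest visited
    else match f with
      | 0 => none
      | f + 1 =>
        dfsLoop adj_matrix goal f
          ((PySem.List.pyRange ((adj_matrix.length : Int) - 1) (-1) (-1)).foldl
            (fun st j =>
              if pvAdj adj_matrix node j ≠ 0 ∧ j ∉ PySem.Set.add visited node then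
                (j, path ++ [j]) :: st
              else st)
            rest)
          (PySem.Set.add visited node)
  termination_by f stack _ => (f, stack.length)

def dfs (adj_matrix : List (List Int)) (start : Int) (goal : Int) : Option (List Int) :=
  dfsLoop adj_matrix goal (adj_matrix.length + 2) [(start, [start])] PySem.Set.empty

-- ===== PORT B =====
-- the 'for neighbor in range(n)' loop of rec, threading the shared visited set;
-- 'recur' is the recursive call into rec
def dfsRecGo (adj_matrix : List (List Int))
    (recur : Int → List Int → PySem.Set Int → Option (List Int) × PySem.Set Int) :
    List Int → Int → List Int → PySem.Set Int → Option (List Int) × PySem.Set Int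
  | [], _, _, visited => (none, visited)
  | j :: js, node, path, visited =>
    if pvAdj adj_matrix node j ≠ 0 ∧ j ∉ visited then
      match recur j (path ++ [j]) visited with
      | (some p, v') => (some p, v')
      | (none, v') => dfsRecGo adj_matrix recur js node path v'
    else dfsRecGo adj_matrix recur js node path visited

-- rec(node, path); the Nat fuel only makes the recursion total (bounds the depth, never exhausted)
def dfsRec (adj_matrix : List (List Int)) (goal : Int) :
    Nat → Int → List Int → PySem.Set Int → Option (List Int) × PySem.Set Int
  | 0, _, _, visited => (none, visited)
  | f + 1, node, path, visited =>
    if node = goal then (some path, visited)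
    else dfsRecGo adj_matrix (dfsRec adj_matrix goal f)
      (PySem.List.pyRange 0 (adj_matrix.length : Int) 1) node path
      (PySem.Set.add visited node)

def dfs_alt (adj_matrix : List (List Int)) (start : Int) (goal : Int) : Option (List Int) :=
  (dfsRec adj_matrix goal (adj_matrix.length + 2) start [start] PySem.Set.empty).1

-- ===== PRECONDITION & SPEC =====
-- Pre_ excludes inputs where Python A raises IndexError (a start index outside Python range
-- for a non-empty matrix, or a reachable row shorter than the matrix); the row-length bound is a
-- closed-form over-approximation, so it also excludes some ragged matrices whose short rows A
-- never actually reads (A returns there; both programs agree — see cites).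
def Pre_dfs (adj_matrix : List (List Int)) (start : Int) (goal : Int) : Prop :=
  start = goal ∨ adj_matrix = [] ∨
    ((∀ row ∈ adj_matrix, adj_matrix.length ≤ row.length) ∧
     -(adj_matrix.length : Int) ≤ start ∧ start < (adj_matrix.length : Int))
instance (adj_matrix : List (List Int)) (start : Int) (goal : Int) : Decidable (Pre_dfs adj_matrix start goal) := by unfold Pre_dfs; infer_instance

def pvWitness_dfs : List (List Int) × Int × Int := ([[0, 1], [0, 0]], 0, 1)

def Spec_dfs (adj_matrix : List (List Int)) (start : Int) (goal : Int) (out : Option (List Int)) : Prop := out = dfs_alt adj_matrix start goal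
instance (adj_matrix : List (List Int)) (start : Int) (goal : Int) (out : Option (List Int)) : Decidable (Spec_dfs adj_matrix start goal out) := by unfold Spec_dfs; infer_instance

-- ===== CLAIM (what is proved, stated in full; the proofs are below) =====
def Claim_equal_dfs : Prop := ∀ (adj_matrix : List (List Int)) (start : Int) (goal : Int), Dom_dfs adj_matrix start goal → Pre_dfs adj_matrix start goal → Spec_dfs adj_matrix start goal (dfs adj_matrix start goal)

-- ===== LEMMAS AND PROOFS =====

-- shorthand for the ascending index range [0, n)
def pvR (adj_matrix : List (List Int)) : List Int :=
  PySem.List.pyRange 0 (adj_matrix.length : Int) 1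

-- invariant carried by the visited set during the search
def InvV (adj_matrix : List (List Int)) (start goal : Int) (v : PySem.Set Int) : Prop :=
  v.Nodup ∧ goal ∉ v ∧ ∀ x ∈ v, x = start ∨ x ∈ pvR adj_matrix

-- conclusion of the simulation lemma: one stack entry of A behaves like one call of B's rec
def KeyConcl (adj_matrix : List (List Int)) (goal : Int) (fB : Nat) (node : Int)
    (path : List Int) (rest : List (Int × List Int)) (v : PySem.Set Int) : Prop :=
  dfsLoop adj_matrix goal (adj_matrix.length + 2 - v.length) ((node, path) :: rest) v =
    match dfsRec adj_matrix goal fB node path v with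
    | (some p, _) => some p
    | (none, v') => dfsLoop adj_matrix goal (adj_matrix.length + 2 - v'.length) rest v'

lemma foldr_condCons (l : List Int) (p : Int → Prop) [DecidablePred p]
    (f : Int → Int × List Int) (init : List (Int × List Int)) :
    l.foldr (fun j st => if p j then f j :: st else st) init
      = (l.filter (fun j => decide (p j))).map f ++ init := by
  induction l with
  | nil => simp
  | cons a l ih =>
    simp only [List.foldr_cons, List.filter_cons, ih]
    by_cases h : p a <;> simp [h]

-- A's reverse-order push loop builds exactly the ascending filtered children on top of rest
lemma pushes_eq (adj_matrix : List (List Int)) (node : Int) (path : List Int)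
    (v : PySem.Set Int) (rest : List (Int × List Int)) :
    (PySem.List.pyRange ((adj_matrix.length : Int) - 1) (-1) (-1)).foldl
      (fun st j => if pvAdj adj_matrix node j ≠ 0 ∧ j ∉ v then (j, path ++ [j]) :: st else st) rest
    = ((pvR adj_matrix).filter (fun j => decide (pvAdj adj_matrix node j ≠ 0 ∧ j ∉ v))).map
        (fun j => (j, path ++ [j])) ++ rest := by
  rw [PySem.List.pyRange_neg_one_eq_reverse, List.foldl_reverse]
  have h : (-1 : Int) + 1 = 0 := by norm_num
  have h2 : ((adj_matrix.length : Int) - 1) + 1 = (adj_matrix.length : Int) := by ring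
  rw [h, h2]
  exact foldr_condCons _ _ _ _

-- post-facts about B's rec: visited only grows (as a prefix), new elements are the entered
-- node or indices in range, goal is never added, Nodup is preserved
def PostRec (adj_matrix : List (List Int)) (goal node : Int)
    (v v' : PySem.Set Int) : Prop :=
  v <+: v' ∧ (∀ x ∈ v', x ∈ v ∨ x = node ∨ x ∈ pvR adj_matrix) ∧
    (goal ∉ v → goal ∉ v') ∧ (v.Nodup → v'.Nodup)

lemma go_post (adj_matrix : List (List Int)) (goal : Int)
    (recur : Int → List Int → PySem.Set Int → Option (List Int) × PySem.Set Int)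
    (hrec : ∀ j path v, PostRec adj_matrix goal j v (recur j path v).2) :
    ∀ (js : List Int) (node : Int) (path : List Int) (v : PySem.Set Int),
      (∀ j ∈ js, j ∈ pvR adj_matrix) →
      PostRec adj_matrix goal node v (dfsRecGo adj_matrix recur js node path v).2 := by
  intro js
  induction js with
  | nil => intro node path v _; exact ⟨List.prefix_refl _, fun x hx => Or.inl hx, fun h => h, fun h => h⟩
  | cons j js ih =>
    intro node path v hjs
    have hjR : j ∈ pvR adj_matrix := hjs j (by simp)
    have hjsR : ∀ x ∈ js, x ∈ pvR adj_matrix := fun x hx => hjs x (by simp [hx])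
    simp only [dfsRecGo]
    split
    · rcases hc : recur j (path ++ [j]) v with ⟨r, v1⟩
      have hp : PostRec adj_matrix goal j v v1 := by
        have := hrec j (path ++ [j]) v; rwa [hc] at this
      cases r with
      | some p => exact ⟨hp.1, fun x hx => (hp.2.1 x hx).imp_right (fun h => Or.inr (h.elim (fun he => he ▸ hjR) id)), hp.2.2.1, hp.2.2.2⟩
      | none =>
        have h2 := ih node path v1 hjsR
        exact ⟨hp.1.trans h2.1,
          fun x hx => by
            rcases h2.2.1 x hx with h | h | h
            · rcases hp.2.1 x h with h' | h' | h'
              · exact Or.inl h'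
              · exact Or.inr (Or.inr (h' ▸ hjR))
              · exact Or.inr (Or.inr h')
            · exact Or.inr (Or.inl h)
            · exact Or.inr (Or.inr h),
          fun h => h2.2.2.1 (hp.2.2.1 h), fun h => h2.2.2.2 (hp.2.2.2 h)⟩
    · exact ih node path v hjsR

lemma rec_post (adj_matrix : List (List Int)) (goal : Int) :
    ∀ (f : Nat) (node : Int) (path : List Int) (v : PySem.Set Int),
      PostRec adj_matrix goal node v (dfsRec adj_matrix goal f node path v).2 := by
  intro f
  induction f with
  | zero => intro node path v; exact ⟨List.prefix_refl _, fun x hx => Or.inl hx, fun h => h, fun h => h⟩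
  | succ f ih =>
    intro node path v
    simp only [dfsRec]
    split
    · exact ⟨List.prefix_refl _, fun x hx => Or.inl hx, fun h => h, fun h => h⟩
    · rename_i hng
      have hadd : PostRec adj_matrix goal node v (PySem.Set.add v node) := by
        refine ⟨?_, ?_, ?_, ?_⟩
        · rw [PySem.Set.add_eq_ite]; split
          · exact List.prefix_refl _
          · exact ⟨[node], rfl⟩
        · intro x hx; rw [PySem.Set.mem_add] at hx; exact hx.imp_right (fun h => Or.inl h)
        · intro h hmem; rw [PySem.Set.mem_add] at hmem
          rcases hmem with h' | h'
          · exact h h'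
          · exact hng h'.symm
        · intro h; exact PySem.Set.nodup_add _ _ h
      have hgo := go_post adj_matrix goal (dfsRec adj_matrix goal f)
        (fun j p v => ih j p v) (pvR adj_matrix) node path (PySem.Set.add v node)
        (fun j hj => hj)
      exact ⟨hadd.1.trans hgo.1,
        fun x hx => by
          rcases hgo.2.1 x hx with h | h | h
          · exact (hadd.2.1 x h)
          · exact Or.inr (Or.inl h)
          · exact Or.inr (Or.inr h),
        fun h => hgo.2.2.1 (hadd.2.2.1 h), fun h => hgo.2.2.2 (hadd.2.2.2 h)⟩

-- visited stays within {start} ∪ [0, n), so its length is at most n + 1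
lemma invv_len (adj_matrix : List (List Int)) (start goal : Int) (v : PySem.Set Int)
    (h : InvV adj_matrix start goal v) : v.length ≤ adj_matrix.length + 1 := by
  rcases h with ⟨hnd, -, hsub⟩
  have hsub' : v.toFinset ⊆ (start :: pvR adj_matrix).toFinset := by
    intro x hx
    rw [List.mem_toFinset] at hx ⊢
    rcases hsub x hx with h | h
    · simp [h]
    · simp [h]
  have h1 : v.toFinset.card = v.length := List.toFinset_card_of_nodup hnd
  have h2 : (start :: pvR adj_matrix).toFinset.card ≤ (start :: pvR adj_matrix).length :=
    List.toFinset_card_le _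
  have h3 : (start :: pvR adj_matrix).length = adj_matrix.length + 1 := by
    simp [pvR, PySem.List.length_pyRange_one]
  have h4 : v.toFinset.card ≤ (start :: pvR adj_matrix).toFinset.card :=
    Finset.card_le_card hsub'
  omega

-- one step of A's sibling segment matches one step of B's neighbour loop
lemma key2 (adj_matrix : List (List Int)) (start goal : Int) (K f : Nat) (node : Int)
    (v₀ : PySem.Set Int)
    (ih : ∀ (v₂ : PySem.Set Int) (fB₂ : Nat) (node₂ : Int) (path₂ : List Int)
        (rest₂ : List (Int × List Int)),
      K < v₂.length → InvV adj_matrix start goal v₂ →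
      (node₂ = start ∨ node₂ ∈ pvR adj_matrix) → node₂ ∉ v₂ →
      adj_matrix.length + 2 ≤ fB₂ + v₂.length →
      KeyConcl adj_matrix goal fB₂ node₂ path₂ rest₂ v₂) :
    ∀ (js : List Int) (path : List Int) (rest : List (Int × List Int)) (v : PySem.Set Int),
      K < v.length → InvV adj_matrix start goal v → (∀ x ∈ v₀, x ∈ v) →
      (∀ j ∈ js, j ∈ pvR adj_matrix) → adj_matrix.length + 2 ≤ f + v.length →
      dfsLoop adj_matrix goal (adj_matrix.length + 2 - v.length)
        ((js.filter (fun j => decide (pvAdj adj_matrix node j ≠ 0 ∧ j ∉ v₀))).map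
          (fun j => (j, path ++ [j])) ++ rest) v
      = match dfsRecGo adj_matrix (dfsRec adj_matrix goal f) js node path v with
        | (some p, _) => some p
        | (none, v') => dfsLoop adj_matrix goal (adj_matrix.length + 2 - v'.length) rest v' := by
  intro js
  induction js with
  | nil => intro path rest v _ _ _ _ _; simp [dfsRecGo]
  | cons j js ihjs =>
    intro path rest v hK hInv hv₀ hjs hf
    have hjR : j ∈ pvR adj_matrix := hjs j (by simp)
    have hjsR : ∀ x ∈ js, x ∈ pvR adj_matrix := fun x hx => hjs x (by simp [hx])
    have hvlen : v.length ≤ adj_matrix.length + 1 := invv_len adj_matrix start goal v hInv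
    by_cases hcnew : pvAdj adj_matrix node j ≠ 0 ∧ j ∉ v
    · -- B recurses into j; on A's side the pushed entry (j, path ++ [j]) is on top
      have hjv₀ : j ∉ v₀ := fun h => hcnew.2 (hv₀ j h)
      have hfilter : decide (pvAdj adj_matrix node j ≠ 0 ∧ j ∉ v₀) = true := by
        simp [hcnew.1, hjv₀]
      have hkey := ih v f j (path ++ [j])
        ((js.filter (fun j' => decide (pvAdj adj_matrix node j' ≠ 0 ∧ j' ∉ v₀))).map
          (fun j' => (j', path ++ [j'])) ++ rest)
        hK hInv (Or.inr hjR) hcnew.2 (by omega)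
      unfold KeyConcl at hkey
      simp only [List.filter_cons, hfilter, if_pos, List.map_cons, List.cons_append]
      rw [hkey]
      simp only [dfsRecGo, if_pos hcnew]
      rcases hr : dfsRec adj_matrix goal f j (path ++ [j]) v with ⟨r, v1⟩
      have hpost : PostRec adj_matrix goal j v v1 := by
        have := rec_post adj_matrix goal f j (path ++ [j]) v; rwa [hr] at this
      cases r with
      | some p => simp
      | none =>
        simp only
        have hlen1 : v.length ≤ v1.length := hpost.1.length_le
        have hInv1 : InvV adj_matrix start goal v1 := by
          rcases hInv with ⟨hnd, hg, hsub⟩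
          exact ⟨hpost.2.2.2 hnd, hpost.2.2.1 hg,
            fun x hx => by
              rcases hpost.2.1 x hx with h | h | h
              · exact hsub x h
              · exact Or.inr (h ▸ hjR)
              · exact Or.inr h⟩
        exact ihjs path rest v1 (by omega) hInv1
          (fun x hx => hpost.1.subset (hv₀ x hx)) hjsR (by omega)
    · -- B skips j; A either never pushed it or pops and skips it as visited
      by_cases hjv₀2 : j ∈ v₀
      · -- not pushed by A, membership already at push time
        have hfilter : decide (pvAdj adj_matrix node j ≠ 0 ∧ j ∉ v₀) = false := by
          simp [hjv₀2]
        have hjv : j ∈ v := hv₀ j hjv₀2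
        simp only [List.filter_cons, hfilter, Bool.false_eq_true, if_false]
        rw [ihjs path rest v hK hInv hv₀ hjsR hf]
        simp only [dfsRecGo]
        rw [if_neg (fun h => h.2 hjv)]
      · by_cases hadj : pvAdj adj_matrix node j = 0
        · -- no edge: neither side considers j
          have hfilter : decide (pvAdj adj_matrix node j ≠ 0 ∧ j ∉ v₀) = false := by
            simp [hadj]
          simp only [List.filter_cons, hfilter, Bool.false_eq_true, if_false]
          rw [ihjs path rest v hK hInv hv₀ hjsR hf]
          simp only [dfsRecGo]
          rw [if_neg (fun h => h.1 hadj)]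
        · -- edge, pushed by A while unvisited, but visited meanwhile: A pops and skips it
          have hjv : j ∈ v := by
            by_contra hjv
            exact hcnew ⟨hadj, hjv⟩
          have hfilter : decide (pvAdj adj_matrix node j ≠ 0 ∧ j ∉ v₀) = true := by
            simp [hadj, hjv₀2]
          have hjg : j ≠ goal := fun h => hInv.2.1 (h ▸ hjv)
          simp only [List.filter_cons, hfilter, if_pos, List.map_cons, List.cons_append]
          obtain ⟨w, hw⟩ : ∃ w, adj_matrix.length + 2 - v.length = w + 1 :=
            ⟨adj_matrix.length + 1 - v.length, by omega⟩
          rw [hw, dfsLoop, if_neg hjg, if_pos hjv, Nat.succ_eq_add_one, ← hw]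
          rw [ihjs path rest v hK hInv hv₀ hjsR hf]
          simp only [dfsRecGo]
          rw [if_neg (fun h => h.2 hjv)]

-- the simulation lemma: popping one unvisited stack entry of A computes exactly B's rec
lemma key1 (adj_matrix : List (List Int)) (start goal : Int) :
    ∀ (μ : Nat) (v : PySem.Set Int) (fB : Nat) (node : Int) (path : List Int)
      (rest : List (Int × List Int)),
      adj_matrix.length + 1 ≤ μ + v.length → InvV adj_matrix start goal v →
      (node = start ∨ node ∈ pvR adj_matrix) → node ∉ v →
      adj_matrix.length + 2 ≤ fB + v.length →
      KeyConcl adj_matrix goal fB node path rest v := by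
  intro μ
  induction μ with
  | zero =>
    intro v fB node path rest hμ hInv hnodeS hnode hfB
    exfalso
    rcases hInv with ⟨hnd, -, hsub⟩
    have hsub' : v.toFinset ⊆ (start :: pvR adj_matrix).toFinset := by
      intro x hx
      rw [List.mem_toFinset] at hx ⊢
      rcases hsub x hx with h | h
      · simp [h]
      · simp [h]
    have h1 : v.toFinset.card = v.length := List.toFinset_card_of_nodup hnd
    have h2 : (start :: pvR adj_matrix).toFinset.card ≤ (start :: pvR adj_matrix).length :=
      List.toFinset_card_le _
    have h3 : (start :: pvR adj_matrix).length = adj_matrix.length + 1 := by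
      simp [pvR, PySem.List.length_pyRange_one]
    have heq : v.toFinset = (start :: pvR adj_matrix).toFinset :=
      Finset.eq_of_subset_of_card_le hsub' (by omega)
    have hmem : node ∈ v.toFinset := by
      rw [heq, List.mem_toFinset]
      rcases hnodeS with h | h
      · simp [h]
      · simp [h]
    exact hnode (List.mem_toFinset.mp hmem)
  | succ μ ihμ =>
    intro v fB node path rest hμ hInv hnodeS hnode hfB
    have hvlen : v.length ≤ adj_matrix.length + 1 :=
      invv_len adj_matrix start goal v hInv
    obtain ⟨w, hw⟩ : ∃ w, adj_matrix.length + 2 - v.length = w + 1 :=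
      ⟨adj_matrix.length + 1 - v.length, by omega⟩
    obtain ⟨g, hg⟩ : ∃ g, fB = g + 1 := ⟨fB - 1, by omega⟩
    unfold KeyConcl
    rw [hw, hg]
    by_cases hgoal : node = goal
    · rw [dfsLoop, if_pos hgoal]
      simp [dfsRec, hgoal]
    · rw [dfsLoop, if_neg hgoal, if_neg hnode]
      simp only [dfsRec]
      rw [if_neg hgoal]
      simp only [pushes_eq]
      have hlen_add : (PySem.Set.add v node).length = v.length + 1 := by
        rw [PySem.Set.add_of_not_mem hnode, List.length_append, List.length_singleton]
      have hInvAdd : InvV adj_matrix start goal (PySem.Set.add v node) := by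
        rcases hInv with ⟨hnd, hg', hsub⟩
        refine ⟨PySem.Set.nodup_add _ _ hnd, ?_, ?_⟩
        · intro hmem
          rw [PySem.Set.mem_add] at hmem
          rcases hmem with h | h
          · exact hg' h
          · exact hgoal h.symm
        · intro x hx
          rw [PySem.Set.mem_add] at hx
          rcases hx with h | h
          · exact hsub x h
          · exact h ▸ hnodeS
      have hkey2 := key2 adj_matrix start goal v.length g node (PySem.Set.add v node)
        (fun v₂ fB₂ node₂ path₂ rest₂ hK2 hI2 hS2 hn2 hf2 =>
          ihμ v₂ fB₂ node₂ path₂ rest₂ (by omega) hI2 hS2 hn2 hf2)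
        (pvR adj_matrix) path rest (PySem.Set.add v node)
        (by omega) hInvAdd (fun x hx => hx) (fun j hj => hj) (by omega)
      have hw2 : adj_matrix.length + 2 - (PySem.Set.add v node).length = w := by omega
      rw [hw2] at hkey2
      exact hkey2

-- ===== VERDICT (by name: the statement is the Claim_ definition above) =====
theorem dfs_spec : Claim_equal_dfs := by
  intro adj_matrix start goal hdom hpre
  unfold Spec_dfs dfs dfs_alt
  have h := key1 adj_matrix start goal (adj_matrix.length + 1) PySem.Set.empty
    (adj_matrix.length + 2) start [start] []
    (by simp [PySem.Set.empty]) ⟨List.nodup_nil, by simp [PySem.Set.empty], by simp [PySem.Set.empty]⟩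
    (Or.inl rfl) (by simp [PySem.Set.empty]) (by simp [PySem.Set.empty])
  unfold KeyConcl at h
  have hlen : (PySem.Set.empty : PySem.Set Int).length = 0 := rfl
  rw [hlen, Nat.sub_zero] at h
  rcases hr : dfsRec adj_matrix goal (adj_matrix.length + 2) start [start] PySem.Set.empty
    with ⟨r, v'⟩
  rw [hr] at h
  cases r with
  | some p => simpa using h
  | none =>
    simp only at h ⊢
    rw [h, dfsLoop]
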